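-- pv_equiv track=rewrite | github.com/unswit/COMP9021_2 | assignment/ass01/class01.py | convert_standard_roman_to_dict
-- ===== SOURCE A (Python) =====
-- def convert_standard_roman_to_dict(romans = "IVXLCDM"):
--     result = {}
--     start = 1
--     if romans:
--         first = romans[0]
--         result[first] = start
--
--         for next_item in romans[1:]:
--             if str(start).startswith("1"):
--                 start = start * 5
--             else:
--                 start = start * 2
--             result[next_item] = start
--     return result
-- ===== SOURCE B (Python) =====
-- def convert_standard_roman_to_dict(romans="IVXLCDM"):
--     return {c: 5 ** ((i + 1) // 2) * 2 ** (i // 2) for i, c in enumerate(romans)}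
-- ===== Notes on version B (the rewrite author's own statement) =====
-- stated objective: simpler
-- what changed: Replaces the running product toggled by a decimal string test (str(start).startswith('1')) with a one-line dict comprehension assigning each position i the closed-form value 5**((i+1)//2) * 2**(i//2).
import Mathlib
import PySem

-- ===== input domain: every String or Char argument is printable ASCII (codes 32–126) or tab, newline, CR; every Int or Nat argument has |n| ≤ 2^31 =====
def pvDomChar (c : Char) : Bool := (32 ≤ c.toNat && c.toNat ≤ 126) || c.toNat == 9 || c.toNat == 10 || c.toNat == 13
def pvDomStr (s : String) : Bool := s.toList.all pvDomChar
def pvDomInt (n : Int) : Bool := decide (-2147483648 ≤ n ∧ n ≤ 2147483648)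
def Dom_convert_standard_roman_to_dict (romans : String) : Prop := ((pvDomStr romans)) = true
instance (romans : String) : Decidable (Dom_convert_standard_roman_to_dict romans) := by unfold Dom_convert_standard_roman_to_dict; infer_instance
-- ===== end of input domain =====

-- B replaces A's running product toggled by a decimal-string test with a per-index
-- closed-form value 5^((i+1)//2) * 2^(i//2) in a dict comprehension (objective: simpler).

-- ===== PORT A =====
-- literal transliteration of A: running `start`, multiplied by 5 when str(start)
-- starts with "1" and by 2 otherwise; iterating a str yields 1-char strings.
def convert_standard_roman_to_dict (romans : String) : List (String × Int) :=
  match romans.toList with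
  | [] => (PySem.Dict.empty : PySem.Dict String Int).items
  | first :: rest =>
      let d0 := (PySem.Dict.empty : PySem.Dict String Int).insert (String.ofList [first]) 1
      (rest.foldl
        (fun (sd : Int × PySem.Dict String Int) next_item =>
          let start := if PySem.Str.startswith (PySem.Int.toStr sd.1) "1"
                       then sd.1 * 5 else sd.1 * 2
          (start, sd.2.insert (String.ofList [next_item]) start))
        (1, d0)).2.items

-- ===== PORT B =====
-- literal transliteration of Source B's dict comprehension over enumerate(romans);
-- the enumerate indices are ≥ 0, so `.toNat` on the floor-divided exponent is exact.
def convert_standard_roman_to_dict_alt (romans : String) : List (String × Int) :=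
  ((PySem.List.enumerate romans.toList 0).foldl
    (fun (d : PySem.Dict String Int) p =>
      d.insert (String.ofList [p.2])
        (5 ^ (PySem.Int.floordiv (p.1 + 1) 2).toNat * 2 ^ (PySem.Int.floordiv p.1 2).toNat))
    PySem.Dict.empty).items

-- ===== PRECONDITION & SPEC =====
def Spec_convert_standard_roman_to_dict (romans : String) (out : List (String × Int)) : Prop := out = convert_standard_roman_to_dict_alt romans
instance (romans : String) (out : List (String × Int)) : Decidable (Spec_convert_standard_roman_to_dict romans out) := by unfold Spec_convert_standard_roman_to_dict; infer_instance

-- ===== CLAIM (what is proved, stated in full; the proofs are below) =====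
def Claim_equal_convert_standard_roman_to_dict : Prop := ∀ (romans : String), Dom_convert_standard_roman_to_dict romans → Spec_convert_standard_roman_to_dict romans (convert_standard_roman_to_dict romans)

-- ===== LEMMAS AND PROOFS =====

-- closed-form value at string index k
def pvV (k : Nat) : Int := 5 ^ ((k + 1) / 2) * 2 ^ (k / 2)

-- common recursion both ports are reduced to
def pvBuild : List Char → Nat → PySem.Dict String Int → PySem.Dict String Int
  | [], _, d => d
  | c :: t, k, d => pvBuild t (k + 1) (d.insert (String.ofList [c]) (pvV k))

lemma pv_toDigitsCore_mul_pow (d : Nat) (hd : 0 < d) (hd' : d < 10) :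
    ∀ (m f : Nat) (acc : List Char), d * 10 ^ m < f →
      Nat.toDigitsCore 10 f (d * 10 ^ m) acc = Nat.digitChar d :: (List.replicate m '0' ++ acc) := by
  intro m
  induction m with
  | zero =>
      intro f acc hf
      match f, hf with
      | f + 1, _ =>
        simp [Nat.toDigitsCore, Nat.div_eq_of_lt hd', Nat.mod_eq_of_lt hd']
  | succ m ih =>
      intro f acc hf
      match f, hf with
      | f + 1, hf =>
        have hx : 0 < d * 10 ^ m := by positivity
        have heq : d * 10 ^ (m + 1) = d * 10 ^ m * 10 := by ring
        rw [heq] at hf ⊢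
        simp only [Nat.toDigitsCore]
        have e1 : d * 10 ^ m * 10 / 10 = d * 10 ^ m := by omega
        have e2 : d * 10 ^ m * 10 % 10 = 0 := by omega
        rw [e1, e2, if_neg (by omega)]
        rw [ih f _ (by omega)]
        simp [List.replicate_succ', Nat.digitChar]

lemma pv_toDigits_mul_pow (d m : Nat) (hd : 0 < d) (hd' : d < 10) :
    Nat.toDigits 10 (d * 10 ^ m) = Nat.digitChar d :: List.replicate m '0' := by
  have := pv_toDigitsCore_mul_pow d hd hd' m (d * 10 ^ m + 1) [] (by omega)
  simpa [Nat.toDigits] using this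

lemma pvV_even (m : Nat) : pvV (2 * m) = ((10 : Int)) ^ m := by
  have h1 : (2 * m + 1) / 2 = m := by omega
  have h2 : 2 * m / 2 = m := by omega
  simp only [pvV, h1, h2]
  rw [← mul_pow]; norm_num

lemma pvV_odd (m : Nat) : pvV (2 * m + 1) = 5 * ((10 : Int)) ^ m := by
  have h1 : (2 * m + 1 + 1) / 2 = m + 1 := by omega
  have h2 : (2 * m + 1) / 2 = m := by omega
  simp only [pvV, h1, h2]
  rw [pow_succ]
  have : ((10 : Int)) ^ m = 5 ^ m * 2 ^ m := by rw [← mul_pow]; norm_num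
  rw [this]; ring

lemma pv_toList_toStr_mul_pow (d m : Nat) (hd : 0 < d) (hd' : d < 10) :
    (PySem.Int.toStr ((d : Int) * 10 ^ m)).toList = Nat.digitChar d :: List.replicate m '0' := by
  rw [PySem.Int.toList_toStr]
  have hnn : ¬ ((d : Int) * 10 ^ m < 0) := not_lt.mpr (by positivity)
  have ht : ((d : Int) * 10 ^ m).toNat = d * 10 ^ m := by
    have : ((d : Int) * 10 ^ m) = ((d * 10 ^ m : Nat) : Int) := by push_cast; ring
    rw [this, Int.toNat_natCast]
  simp only [PySem.Int.toChars, if_neg hnn, ht]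
  exact pv_toDigits_mul_pow d m hd hd'

lemma pv_startswith (k : Nat) :
    PySem.Str.startswith (PySem.Int.toStr (pvV k)) "1" = decide (k % 2 = 0) := by
  unfold PySem.Str.startswith
  have hone : ("1" : String).toList = ['1'] := rfl
  rcases Nat.even_or_odd k with ⟨m, hm⟩ | ⟨m, hm⟩
  · subst hm
    rw [show m + m = 2 * m by ring, pvV_even]
    have h10 : ((10 : Int)) ^ m = ((1 : Nat) : Int) * 10 ^ m := by push_cast; ring
    rw [h10, pv_toList_toStr_mul_pow 1 m (by norm_num) (by norm_num), hone]
    simp [PySem.Chars.startswith, List.isPrefixOf, Nat.digitChar]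
  · subst hm
    rw [pvV_odd]
    have h5 : (5 : Int) * 10 ^ m = ((5 : Nat) : Int) * 10 ^ m := by push_cast; ring
    rw [h5, pv_toList_toStr_mul_pow 5 m (by norm_num) (by norm_num), hone]
    simp [PySem.Chars.startswith, List.isPrefixOf, Nat.digitChar]

lemma pvV_succ (k : Nat) :
    pvV (k + 1) = if k % 2 = 0 then pvV k * 5 else pvV k * 2 := by
  rcases Nat.even_or_odd k with ⟨m, hm⟩ | ⟨m, hm⟩
  · subst hm
    rw [show m + m = 2 * m by ring]
    rw [if_pos (by omega), pvV_even, pvV_odd]; ring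
  · subst hm
    rw [if_neg (by omega)]
    rw [show 2 * m + 1 + 1 = 2 * (m + 1) by ring, pvV_even, pvV_odd, pow_succ]; ring

-- A''s loop, started with value pvV k, fills indices k+1, k+2, …
lemma pvA_loop (l : List Char) : ∀ (k : Nat) (d : PySem.Dict String Int),
    (l.foldl
      (fun (sd : Int × PySem.Dict String Int) next_item =>
        let start := if PySem.Str.startswith (PySem.Int.toStr sd.1) "1"
                     then sd.1 * 5 else sd.1 * 2
        (start, sd.2.insert (String.ofList [next_item]) start))
      (pvV k, d)).2 = pvBuild l (k + 1) d := by
  induction l with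
  | nil => intro k d; simp [pvBuild]
  | cons c t ih =>
      intro k d
      have hstep : (if PySem.Str.startswith (PySem.Int.toStr (pvV k)) "1"
                    then pvV k * 5 else pvV k * 2) = pvV (k + 1) := by
        rw [pv_startswith, pvV_succ]
        by_cases h : k % 2 = 0 <;> simp [h]
      rw [List.foldl_cons]
      show (List.foldl _
        ((if PySem.Str.startswith (PySem.Int.toStr (pvV k)) "1" then pvV k * 5 else pvV k * 2,
          d.insert (String.ofList [c])
            (if PySem.Str.startswith (PySem.Int.toStr (pvV k)) "1" then pvV k * 5 else pvV k * 2)) :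
          Int × PySem.Dict String Int) t).2 = _
      rw [hstep]
      rw [show pvBuild (c :: t) (k + 1) d
          = pvBuild t (k + 1 + 1) (d.insert (String.ofList [c]) (pvV (k + 1))) from rfl]
      exact ih (k + 1) _

lemma pv_floordiv_nat (k : Nat) : (PySem.Int.floordiv (k : Int) 2).toNat = k / 2 := by
  have h : PySem.Int.floordiv (k : Int) 2 = (k : Int) / 2 := by
    simp [PySem.Int.floordiv, Int.fdiv_eq_ediv]
  rw [h]; omega

-- B''s fold over enumerate, from any start index k, fills indices k, k+1, …
lemma pvB_loop (l : List Char) : ∀ (k : Nat) (d : PySem.Dict String Int),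
    ((PySem.List.enumerate l (k : Int)).foldl
      (fun (d : PySem.Dict String Int) p =>
        d.insert (String.ofList [p.2])
          (5 ^ (PySem.Int.floordiv (p.1 + 1) 2).toNat * 2 ^ (PySem.Int.floordiv p.1 2).toNat))
      d) = pvBuild l k d := by
  induction l with
  | nil => intro k d; simp [PySem.List.enumerate, pvBuild]
  | cons c t ih =>
      intro k d
      rw [PySem.List.enumerate_cons]
      simp only [List.foldl_cons]
      have hcast : ((k : Int) + 1) = ((k + 1 : Nat) : Int) := by push_cast; ring
      have hval : (5 : Int) ^ (PySem.Int.floordiv ((k : Int) + 1) 2).toNat *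
          2 ^ (PySem.Int.floordiv (k : Int) 2).toNat = pvV k := by
        rw [hcast, pv_floordiv_nat, pv_floordiv_nat, pvV]
      rw [hval]
      rw [show pvBuild (c :: t) k d
          = pvBuild t (k + 1) (d.insert (String.ofList [c]) (pvV k)) from rfl]
      rw [hcast]
      exact ih (k + 1) _

lemma pvA_eq (romans : String) :
    convert_standard_roman_to_dict romans = (pvBuild romans.toList 0 PySem.Dict.empty).items := by
  unfold convert_standard_roman_to_dict
  cases h : romans.toList with
  | nil => simp [pvBuild]
  | cons first rest =>
      have h1 : (1 : Int) = pvV 0 := by norm_num [pvV]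
      have hA := pvA_loop rest 0 (PySem.Dict.empty.insert (String.ofList [first]) 1)
      rw [← h1] at hA
      show (rest.foldl
          (fun (sd : Int × PySem.Dict String Int) next_item =>
            let start := if PySem.Str.startswith (PySem.Int.toStr sd.1) "1"
                         then sd.1 * 5 else sd.1 * 2
            (start, sd.2.insert (String.ofList [next_item]) start))
          (1, PySem.Dict.empty.insert (String.ofList [first]) 1)).2.items = _
      rw [hA]
      rw [show pvBuild (first :: rest) 0 PySem.Dict.empty
          = pvBuild rest (0 + 1) (PySem.Dict.empty.insert (String.ofList [first]) (pvV 0)) from rfl]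
      rw [← h1]

lemma pvB_eq (romans : String) :
    convert_standard_roman_to_dict_alt romans = (pvBuild romans.toList 0 PySem.Dict.empty).items := by
  unfold convert_standard_roman_to_dict_alt
  rw [show (0 : Int) = ((0 : Nat) : Int) from rfl]
  rw [pvB_loop]

-- ===== VERDICT (by name: the statement is the Claim_ definition above) =====
theorem convert_standard_roman_to_dict_spec : Claim_equal_convert_standard_roman_to_dict := by
  intro romans _
  show _ = _
  rw [pvA_eq, pvB_eq]
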